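-- pv_equiv track=rewrite | github.com/seyoulax/algorithms | sortbychoice/sortbychoice.py | sortOne
-- ===== SOURCE A (Python) =====
-- def sortOne(arr):
--     smallest = arr[0]
--     index = 0
--     for i in range(len(arr)):
--         if arr[i] < smallest:
--             smallest = arr[i]
--             index = i
--     return index
-- ===== SOURCE B (Python) =====
-- def sortOne(arr):
--     return sorted(range(len(arr)), key=lambda i: arr[i])[0]
-- ===== Notes on version B (the rewrite author's own statement) =====
-- stated objective: alternative
-- what changed: Replaces the single-pass min-tracking loop by selection via sorting: stably sort the index list by element value and take the first index; stability of sorted() makes the earliest index of the minimum come first, matching A's strict-< update rule.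
import Mathlib
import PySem

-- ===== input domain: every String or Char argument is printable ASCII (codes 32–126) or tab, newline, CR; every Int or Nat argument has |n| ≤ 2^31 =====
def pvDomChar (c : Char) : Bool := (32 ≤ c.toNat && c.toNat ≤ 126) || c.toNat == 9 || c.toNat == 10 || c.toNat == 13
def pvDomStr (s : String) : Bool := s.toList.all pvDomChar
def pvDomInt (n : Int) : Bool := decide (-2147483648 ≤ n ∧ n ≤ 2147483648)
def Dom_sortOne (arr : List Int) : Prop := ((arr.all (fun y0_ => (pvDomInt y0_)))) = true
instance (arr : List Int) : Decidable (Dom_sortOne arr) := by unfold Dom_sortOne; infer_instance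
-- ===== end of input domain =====

-- B replaces A's single-pass min-tracking loop by selection via stable sorting of the index list (sorted(range(n), key)[0]); objective: alternative algorithm, same return values.


-- ===== PORT A =====
-- smallest = arr[0]; index = 0; for i in range(len(arr)): if arr[i] < smallest: smallest, index = arr[i], i; return index
-- (arr[0] and arr[i] ported with pyGetD: Pre_ requires arr ≠ [], and inside the loop i is always in range)
def sortOne (arr : List Int) : Int :=
  let smallest : Int := PySem.List.pyGetD arr 0 0
  let r := (PySem.List.pyRange 0 (arr.length : Int) 1).foldl
    (fun (s : Int × Int) (i : Int) =>
      if PySem.List.pyGetD arr i 0 < s.1 then (PySem.List.pyGetD arr i 0, i) else s)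
    (smallest, 0)
  r.2

-- ===== PORT B =====
-- return sorted(range(len(arr)), key=lambda i: arr[i])[0]
-- (the subscript [0] is pyGetD …; it is in range under Pre_, and arr[i] inside the key is always in range)
def sortOne_alt (arr : List Int) : Int :=
  PySem.List.pyGetD
    (PySem.List.sorted (PySem.List.pyRange 0 (arr.length : Int) 1)
      (fun i => PySem.List.pyGetD arr i 0))
    0 0

-- ===== PRECONDITION & SPEC =====
-- Pre_ excludes only the empty list, on which both Pythons raise IndexError (A at arr[0], B at [...][0]).
def Pre_sortOne (arr : List Int) : Prop := arr ≠ []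
instance (arr : List Int) : Decidable (Pre_sortOne arr) := by unfold Pre_sortOne; infer_instance
def pvWitness_sortOne : List Int := [3, 1, 2, 1]

def Spec_sortOne (arr : List Int) (out : Int) : Prop := out = sortOne_alt arr
instance (arr : List Int) (out : Int) : Decidable (Spec_sortOne arr out) := by unfold Spec_sortOne; infer_instance

-- ===== CLAIM (what is proved, stated in full; the proofs are below) =====
def Claim_equal_sortOne : Prop := ∀ (arr : List Int), Dom_sortOne arr → Pre_sortOne arr → Spec_sortOne arr (sortOne arr)

-- ===== LEMMAS AND PROOFS =====

-- one step of the insertion sort: the head of insertBy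
lemma insertBy_cons {α : Type} (bef : α → α → Bool) (x h : α) (t : List α) :
    PySem.List.insertBy bef x (h :: t) =
      if bef x h then x :: h :: t else h :: PySem.List.insertBy bef x t := by
  simp [PySem.List.insertBy]

-- head of the insertion-sort fold: only the head of the accumulator matters, and it evolves by 'keep the first strict winner'
lemma headD_foldl_insertBy {α : Type} (bef : α → α → Bool) (xs : List α) :
    ∀ (h : α) (t : List α) (d : α),
      (xs.foldl (fun acc x => PySem.List.insertBy bef x acc) (h :: t)).headD d =
      xs.foldl (fun c x => if bef x c then x else c) h := by
  induction xs with
  | nil => intro h t d; rfl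
  | cons x xs ih =>
    intro h t d
    simp only [List.foldl_cons, insertBy_cons]
    by_cases hb : bef x h
    · rw [if_pos hb, if_pos hb, ih]
    · rw [if_neg hb, if_neg hb, ih]

-- A's (value, index) pair fold projects to the index-only fold, provided the value component is the key of the index
lemma pairfold_eq_pickfold (arr : List Int) (l : List Int) :
    ∀ (c : Int),
      (l.foldl
        (fun (s : Int × Int) (i : Int) =>
          if PySem.List.pyGetD arr i 0 < s.1 then (PySem.List.pyGetD arr i 0, i) else s)
        (PySem.List.pyGetD arr c 0, c)).2 =
      l.foldl (fun c i => if PySem.List.pyGetD arr i 0 < PySem.List.pyGetD arr c 0 then i else c) c := by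
  induction l with
  | nil => intro c; rfl
  | cons i l ih =>
    intro c
    simp only [List.foldl_cons]
    by_cases h : PySem.List.pyGetD arr i 0 < PySem.List.pyGetD arr c 0
    · rw [if_pos h, if_pos h, ih]
    · rw [if_neg h, if_neg h, ih]

lemma getD_zero_eq_headD {α : Type} (xs : List α) (d : α) : xs.getD 0 d = xs.headD d := by
  cases xs <;> rfl

-- ===== VERDICT (by name: the statement is the Claim_ definition above) =====
theorem sortOne_spec : Claim_equal_sortOne := by
  intro arr _ hpre
  unfold Spec_sortOne
  cases harr : arr with
  | nil => exact absurd harr hpre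
  | cons a rest =>
    -- the shared index range: 0 :: range(1, n)
    have hn : (0 : Int) < ((a :: rest).length : Int) := by
      simp only [List.length_cons]; push_cast; omega
    have hrange : PySem.List.pyRange 0 ((a :: rest).length : Int) 1 =
        0 :: PySem.List.pyRange 1 ((a :: rest).length : Int) 1 :=
      PySem.List.pyRange_one_cons hn
    -- A's side: the first loop iteration (i = 0) leaves the state unchanged, then project the pair fold
    have hA : sortOne (a :: rest) =
        (PySem.List.pyRange 1 ((a :: rest).length : Int) 1).foldl
          (fun c i => if PySem.List.pyGetD (a :: rest) i 0 < PySem.List.pyGetD (a :: rest) c 0 then i else c) 0 := by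
      unfold sortOne
      dsimp only
      rw [hrange, List.foldl_cons, if_neg (lt_irrefl _), pairfold_eq_pickfold]
    -- B's side: the insertion sort of 0 :: range(1, n), whose head is the same pick fold
    have hB : sortOne_alt (a :: rest) =
        (PySem.List.pyRange 1 ((a :: rest).length : Int) 1).foldl
          (fun c i => if PySem.List.pyGetD (a :: rest) i 0 < PySem.List.pyGetD (a :: rest) c 0 then i else c) 0 := by
      unfold sortOne_alt
      rw [PySem.List.sorted_eq_foldl_insertBy, hrange, List.foldl_cons]
      show PySem.List.pyGetD
        ((PySem.List.pyRange 1 ((a :: rest).length : Int) 1).foldl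
          (fun acc x => PySem.List.insertBy (fun i j => decide (PySem.List.pyGetD (a :: rest) i 0 < PySem.List.pyGetD (a :: rest) j 0)) x acc)
          (PySem.List.insertBy _ 0 [])) 0 0 = _
      rw [PySem.List.pyGetD_zero, getD_zero_eq_headD]
      show ((PySem.List.pyRange 1 ((a :: rest).length : Int) 1).foldl
          (fun acc x => PySem.List.insertBy _ x acc) (0 :: [])).headD 0 = _
      rw [headD_foldl_insertBy]
      simp only [decide_eq_true_eq]
    rw [hA, hB]
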